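-- pv_equiv track=rewrite | github.com/epusateri/photokinthesis | src/photokinthesis/xmp_parser.py | _extract_tag_name
-- ===== SOURCE A (Python) =====
-- NAMESPACES = {
--     'x': 'adobe:ns:meta/',
--     'rdf': 'http://www.w3.org/1999/02/22-rdf-syntax-ns#',
--     'dc': 'http://purl.org/dc/elements/1.1/',
--     'xmp': 'http://ns.adobe.com/xap/1.0/',
--     'photoshop': 'http://ns.adobe.com/photoshop/1.0/',
--     'xmpRights': 'http://ns.adobe.com/xap/1.0/rights/',
--     'Iptc4xmpCore': 'http://iptc.org/std/Iptc4xmpCore/1.0/xmlns/',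
--     'exif': 'http://ns.adobe.com/exif/1.0/',
--     'mwg-rs': 'http://www.metadataworkinggroup.com/schemas/regions/',
--     'stArea': 'http://ns.adobe.com/xmp/sType/Area#',
-- }
--
-- def _extract_tag_name(tag: str) -> str:
--     """
--     Extract namespace:name from full XML tag.
--
--     Args:
--         tag: Full tag in format {http://namespace/uri}localname
--
--     Returns:
--         Tag in format namespace:localname (e.g., "dc:source")
--     """
--     # Tag format: {http://namespace/uri}localname
--     # Convert to: namespace:localname
--     for prefix, uri in NAMESPACES.items():
--         if tag.startswith(f'{{{uri}}}'):
--             local_name = tag[len(f'{{{uri}}}'):]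
--             return f'{prefix}:{local_name}'
--
--     # If no namespace match, return as-is (strip braces if present)
--     if tag.startswith('{'):
--         # Unknown namespace, just return local name
--         return tag.split('}')[1] if '}' in tag else tag
--     return tag
-- ===== SOURCE B (Python) =====
-- NAMESPACES = {
--     'x': 'adobe:ns:meta/',
--     'rdf': 'http://www.w3.org/1999/02/22-rdf-syntax-ns#',
--     'dc': 'http://purl.org/dc/elements/1.1/',
--     'xmp': 'http://ns.adobe.com/xap/1.0/',
--     'photoshop': 'http://ns.adobe.com/photoshop/1.0/',
--     'xmpRights': 'http://ns.adobe.com/xap/1.0/rights/',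
--     'Iptc4xmpCore': 'http://iptc.org/std/Iptc4xmpCore/1.0/xmlns/',
--     'exif': 'http://ns.adobe.com/exif/1.0/',
--     'mwg-rs': 'http://www.metadataworkinggroup.com/schemas/regions/',
--     'stArea': 'http://ns.adobe.com/xmp/sType/Area#',
-- }
--
-- # Reverse map built once: uri -> prefix (URIs are distinct, none contains '}').
-- URI_TO_PREFIX = {uri: prefix for prefix, uri in NAMESPACES.items()}
--
-- def _extract_tag_name(tag: str) -> str:
--     if tag.startswith('{'):
--         uri, sep, local_name = tag[1:].partition('}')
--         if sep:
--             prefix = URI_TO_PREFIX.get(uri)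
--             if prefix is not None:
--                 return f'{prefix}:{local_name}'
--             # unknown namespace: local part up to the next '}'
--             return tag.split('}')[1]
--     return tag
-- ===== Notes on version B (the rewrite author's own statement) =====
-- stated objective: simpler
-- what changed: Replaces the linear startswith-scan over NAMESPACES with one partition of the tag at its first closing brace and a single lookup in a precomputed uri-to-prefix reverse dict; correct because no namespace URI contains a closing brace, so the exact brace-delimited URI equals the first-startswith match.
import Mathlib
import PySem

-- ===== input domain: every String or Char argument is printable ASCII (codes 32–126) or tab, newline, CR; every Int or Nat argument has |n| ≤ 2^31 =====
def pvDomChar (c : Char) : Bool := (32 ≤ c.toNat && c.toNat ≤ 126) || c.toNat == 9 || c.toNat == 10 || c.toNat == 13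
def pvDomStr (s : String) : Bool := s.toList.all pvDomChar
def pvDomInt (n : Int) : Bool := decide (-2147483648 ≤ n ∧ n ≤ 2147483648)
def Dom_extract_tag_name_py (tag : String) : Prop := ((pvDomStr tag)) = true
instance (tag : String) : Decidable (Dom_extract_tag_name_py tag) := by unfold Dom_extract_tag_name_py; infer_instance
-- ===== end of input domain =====

-- B replaces A's startswith-scan over NAMESPACES by one partition at the first '}' and a
-- single reverse-dict lookup (objective: simpler).

-- ===== PORT A =====
-- NAMESPACES, in insertion order
def pvNamespaces : List (String × String) :=
  [("x", "adobe:ns:meta/"),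
   ("rdf", "http://www.w3.org/1999/02/22-rdf-syntax-ns#"),
   ("dc", "http://purl.org/dc/elements/1.1/"),
   ("xmp", "http://ns.adobe.com/xap/1.0/"),
   ("photoshop", "http://ns.adobe.com/photoshop/1.0/"),
   ("xmpRights", "http://ns.adobe.com/xap/1.0/rights/"),
   ("Iptc4xmpCore", "http://iptc.org/std/Iptc4xmpCore/1.0/xmlns/"),
   ("exif", "http://ns.adobe.com/exif/1.0/"),
   ("mwg-rs", "http://www.metadataworkinggroup.com/schemas/regions/"),
   ("stArea", "http://ns.adobe.com/xmp/sType/Area#")]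

-- the 'for prefix, uri in NAMESPACES.items(): if tag.startswith(f'{{{uri}}}'): return …' loop
def pvLoopA : List (String × String) → List Char → Option (List Char)
  | [], _ => none
  | (p, u) :: rest, cs =>
    if PySem.Chars.startswith cs ('{' :: u.toList ++ ['}']) then
      -- local_name = tag[len(f'{{{uri}}}'):] ; return f'{prefix}:{local_name}'
      some (p.toList ++ ':' :: PySem.List.slice cs (some ((('{' :: u.toList ++ ['}']).length : Nat) : Int)) none)
    else pvLoopA rest cs

def extract_tag_name_py (tag : String) : String :=
  let cs := tag.toList
  match pvLoopA pvNamespaces cs with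
  | some r => String.ofList r
  | none =>
    if PySem.Chars.startswith cs ['{'] then
      if PySem.Chars.isIn ['}'] cs then
        -- tag.split('}')[1] — index 1 exists since '}' ∈ tag, so pyGetD is exact here
        String.ofList (PySem.List.pyGetD (PySem.Chars.splitOn cs ['}']) 1 [])
      else tag
    else tag

-- ===== PORT B =====
-- URI_TO_PREFIX = {uri: prefix for prefix, uri in NAMESPACES.items()}
def pvUriToPrefix : PySem.Dict (List Char) (List Char) :=
  pvNamespaces.foldl (fun d pu => d.insert pu.2.toList pu.1.toList) PySem.Dict.empty

def extract_tag_name_py_alt (tag : String) : String :=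
  let cs := tag.toList
  if PySem.Chars.startswith cs ['{'] then
    -- uri, sep, local_name = tag[1:].partition('}') — ported by hand, exact for the
    -- one-char separator: uri = part before the first '}', found = sep + local_name
    let rest := PySem.List.slice cs (some 1) none
    let uri := rest.takeWhile (· ≠ '}')
    let found := rest.dropWhile (· ≠ '}')
    if found.isEmpty then tag                           -- sep == '' : fall through to 'return tag'
    else
      match pvUriToPrefix.get? uri with
      | some p => String.ofList (p ++ ':' :: found.tail)  -- f'{prefix}:{local_name}'
      | none => String.ofList (PySem.List.pyGetD (PySem.Chars.splitOn cs ['}']) 1 [])  -- tag.split('}')[1]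
  else tag

-- ===== PRECONDITION & SPEC =====
def Spec_extract_tag_name_py (tag : String) (out : String) : Prop := out = extract_tag_name_py_alt tag
instance (tag : String) (out : String) : Decidable (Spec_extract_tag_name_py tag out) := by unfold Spec_extract_tag_name_py; infer_instance

-- ===== CLAIM (what is proved, stated in full; the proofs are below) =====
def Claim_equal_extract_tag_name_py : Prop := ∀ (tag : String), Dom_extract_tag_name_py tag → Spec_extract_tag_name_py tag (extract_tag_name_py tag)

-- ===== LEMMAS AND PROOFS =====

-- if tag does not start with '{', no '{uri}' pattern matches
theorem pvLoopA_none_of_not_open (cs : List Char) (h : ¬ ['{'] <+: cs) :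
    ∀ ns, pvLoopA ns cs = none := by
  intro ns
  induction ns with
  | nil => rfl
  | cons pu rest ih =>
    obtain ⟨p, u⟩ := pu
    simp only [pvLoopA]
    rw [if_neg, ih]
    intro hs
    exact h (List.IsPrefix.trans ⟨u.toList ++ ['}'], rfl⟩ ((PySem.Chars.startswith_iff _ _).mp hs))

-- if tag contains no '}', no '{uri}' pattern matches
theorem pvLoopA_none_of_no_close (cs : List Char) (h : ('}' : Char) ∉ cs) :
    ∀ ns, pvLoopA ns cs = none := by
  intro ns
  induction ns with
  | nil => rfl
  | cons pu rest ih =>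
    obtain ⟨p, u⟩ := pu
    simp only [pvLoopA]
    rw [if_neg, ih]
    intro hs
    exact h (((PySem.Chars.startswith_iff _ _).mp hs).subset (by simp))

-- the first element dropWhile exposes fails the predicate
theorem pv_dropWhile_head (f : Char → Bool) : ∀ (l : List Char) (c : Char) (post : List Char),
    l.dropWhile f = c :: post → f c = false := by
  intro l
  induction l with
  | nil => intro c post h; simp at h
  | cons a t ih =>
    intro c post h
    by_cases hfa : f a = true
    · rw [List.dropWhile_cons_of_pos hfa] at h
      exact ih c post h
    · rw [List.dropWhile_cons_of_neg hfa] at h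
      cases h
      simpa using hfa

-- two '}'-free blocks in front of the same first '}' are equal
theorem pv_eq_of_append (u pre t post : List Char)
    (hu : ('}' : Char) ∉ u) (hp : ('}' : Char) ∉ pre)
    (ht : u ++ '}' :: t = pre ++ '}' :: post) : u = pre := by
  induction u generalizing pre with
  | nil =>
    cases pre with
    | nil => rfl
    | cons b pre' =>
      simp only [List.mem_cons, not_or] at hp
      simp only [List.nil_append, List.cons_append, List.cons.injEq] at ht
      exact absurd ht.1 hp.1
  | cons a u' ihu =>
    simp only [List.mem_cons, not_or] at hu
    cases pre with
    | nil =>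
      simp only [List.cons_append, List.nil_append, List.cons.injEq] at ht
      exact absurd ht.1.symm hu.1
    | cons b pre' =>
      simp only [List.mem_cons, not_or] at hp
      simp only [List.cons_append, List.cons.injEq] at ht
      rw [ht.1]
      congr 1
      exact ihu pre' hu.2 hp.2 ht.2

-- the heart: on a tag '{pre}post' (no '}' in pre), the pattern '{u}' matches iff u = pre
theorem pv_startswith_pat (u pre post : List Char)
    (hu : ('}' : Char) ∉ u) (hp : ('}' : Char) ∉ pre) :
    PySem.Chars.startswith ('{' :: (pre ++ '}' :: post)) ('{' :: u ++ ['}']) = (u == pre) := by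
  by_cases heq : u = pre
  · subst heq
    rw [beq_self_eq_true, PySem.Chars.startswith_iff]
    exact ⟨post, by simp⟩
  · rw [beq_false_of_ne heq, Bool.eq_false_iff]
    intro hs
    obtain ⟨t, ht⟩ := (PySem.Chars.startswith_iff _ _).mp hs
    simp only [List.cons_append, List.append_assoc, List.cons.injEq, true_and] at ht
    exact heq (pv_eq_of_append u pre t post hu hp ht)

-- dropping the matched '{uri}' pattern from '{pre}post' leaves post
theorem pv_drop_pat (pre post : List Char) :
    ('{' :: (pre ++ '}' :: post)).drop (pre.length + 2) = post := by
  have : '{' :: (pre ++ '}' :: post) = ('{' :: pre ++ ['}']) ++ post := by simp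
  rw [this, List.drop_append_of_le_length (by simp)]
  simp

-- the value A returns from a matched branch, as a function of pre and post
theorem pv_step (u p pre post : List Char) (h : (u == pre) = true) :
    p ++ ':' :: PySem.List.slice ('{' :: (pre ++ '}' :: post))
        (some ((('{' :: u ++ ['}']).length : Nat) : Int)) none = p ++ ':' :: post := by
  have he : u = pre := by simpa using h
  subst he
  rw [PySem.List.slice_from_natCast]
  have hl : ('{' :: u ++ ['}']).length = u.length + 2 := by simp
  rw [hl, pv_drop_pat]

-- lookups are unaffected by later inserts at other keys
theorem pv_get?_foldl_of_ne (ns : List (String × String)) (pre : List Char)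
    (h : ∀ pu ∈ ns, pu.2.toList ≠ pre) (d : PySem.Dict (List Char) (List Char)) :
    (ns.foldl (fun d pu => d.insert pu.2.toList pu.1.toList) d).get? pre = d.get? pre := by
  induction ns generalizing d with
  | nil => rfl
  | cons pu rest ih =>
    simp only [List.foldl_cons]
    rw [ih (fun q hq => h q (List.mem_cons_of_mem _ hq)),
        PySem.Dict.get?_insert_of_ne _ _ (fun he => h pu (List.mem_cons_self) he.symm)]

-- A's scan over a namespace list = one lookup in the dict folded from it, on a '{pre}post' tag
theorem pv_loop_eq_lookup_gen (ns : List (String × String)) (pre post : List Char)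
    (hp : ('}' : Char) ∉ pre)
    (hfree : ∀ pu ∈ ns, ('}' : Char) ∉ pu.2.toList)
    (hnd : (ns.map (fun pu => pu.2.toList)).Nodup)
    (d : PySem.Dict (List Char) (List Char)) (hmiss : d.get? pre = none) :
    pvLoopA ns ('{' :: (pre ++ '}' :: post))
      = ((ns.foldl (fun d pu => d.insert pu.2.toList pu.1.toList) d).get? pre).map
          (fun p => p ++ ':' :: post) := by
  induction ns generalizing d with
  | nil => simp [pvLoopA, hmiss]
  | cons pu rest ih =>
    obtain ⟨p, u⟩ := pu
    simp only [List.map_cons, List.nodup_cons] at hnd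
    simp only [pvLoopA, List.foldl_cons]
    rw [pv_startswith_pat _ _ _ (hfree (p, u) (List.mem_cons_self)) hp]
    by_cases heq : u.toList = pre
    · rw [beq_iff_eq.mpr heq, if_pos rfl]
      rw [pv_get?_foldl_of_ne rest pre
            (fun q hq hqe => hnd.1 (heq ▸ hqe ▸ List.mem_map_of_mem hq)) _,
          heq, PySem.Dict.get?_insert_self]
      exact congrArg some (pv_step pre p.toList pre post (by simp))
    · rw [beq_false_of_ne heq, if_neg (by simp)]
      exact ih (fun q hq => hfree q (List.mem_cons_of_mem _ hq)) hnd.2 _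
        (by rw [PySem.Dict.get?_insert_of_ne _ _ (fun he => heq he.symm)]; exact hmiss)

-- A's scan over NAMESPACES = one lookup in B's reverse dict
theorem pv_loop_eq_lookup (pre post : List Char) (hp : ('}' : Char) ∉ pre) :
    pvLoopA pvNamespaces ('{' :: (pre ++ '}' :: post))
      = (pvUriToPrefix.get? pre).map (fun p => p ++ ':' :: post) := by
  rw [pvUriToPrefix]
  exact pv_loop_eq_lookup_gen pvNamespaces pre post hp (by decide) (by decide)
    PySem.Dict.empty (PySem.Dict.get?_empty pre)

theorem pv_main (tag : String) : extract_tag_name_py tag = extract_tag_name_py_alt tag := by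
  simp only [extract_tag_name_py, extract_tag_name_py_alt]
  cases hs : PySem.Chars.startswith tag.toList ['{'] with
  | false =>
    have hnp : ¬ ['{'] <+: tag.toList := fun hpre => by
      rw [(PySem.Chars.startswith_iff _ _).mpr hpre] at hs; exact absurd hs (by decide)
    rw [pvLoopA_none_of_not_open tag.toList hnp]
    rfl
  | true =>
    obtain ⟨rest, hcs⟩ := (PySem.Chars.startswith_iff _ _).mp hs
    rw [← hcs]
    simp only [List.singleton_append, PySem.List.slice_from_one, List.tail_cons]
    by_cases hmem : ('}' : Char) ∈ rest
    · -- '}' occurs: rest = pre ++ '}' :: post with '}' ∉ pre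
      cases hdw : rest.dropWhile (fun x => decide (x ≠ '}')) with
      | nil =>
        rw [List.dropWhile_eq_nil_iff] at hdw
        have := hdw '}' hmem
        simp at this
      | cons c post =>
        have hc : c = '}' := by
          simpa using pv_dropWhile_head _ rest c post hdw
        subst hc
        have hp : ('}' : Char) ∉ rest.takeWhile (fun x => decide (x ≠ '}')) := by
          intro hmem'
          simpa using List.mem_takeWhile_imp hmem'
        have hsplit : rest = rest.takeWhile (fun x => decide (x ≠ '}')) ++ '}' :: post := by
          conv_lhs => rw [← List.takeWhile_append_dropWhile
            (p := fun x => decide (x ≠ '}')) (l := rest)]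
          rw [hdw]
        set pre := rest.takeWhile (fun x => decide (x ≠ '}')) with hpre
        rw [hsplit, pv_loop_eq_lookup pre post hp]
        have hin : PySem.Chars.isIn ['}'] ('{' :: (pre ++ '}' :: post)) = true := by
          rw [PySem.Chars.isIn_iff_infix]
          exact ⟨'{' :: pre, post, by simp⟩
        cases hg : pvUriToPrefix.get? pre with
        | some p => simp
        | none => simp [hin]
    · -- no '}': the loop fails, both sides return tag unchanged
      have hnc : ('}' : Char) ∉ '{' :: rest := by simp [hmem]
      have hisin : PySem.Chars.isIn ['}'] ('{' :: rest) = false := by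
        rw [PySem.Chars.isIn_eq_false_iff]
        exact fun hinf => hnc (hinf.subset (by simp))
      rw [pvLoopA_none_of_no_close _ hnc, List.dropWhile_eq_nil_iff.mpr
        (fun x hx => by
          simp only [decide_eq_true_eq]
          exact fun he => hmem (he ▸ hx))]
      simp [hisin]

-- ===== VERDICT (by name: the statement is the Claim_ definition above) =====
theorem extract_tag_name_py_spec : Claim_equal_extract_tag_name_py := by
  intro tag _
  unfold Spec_extract_tag_name_py
  exact pv_main tag
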